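-- pv_equiv track=rewrite | github.com/Terrydaktal/wordscrape | build_worddefs.py | _extract_template
-- ===== SOURCE A (Python) =====
-- def _extract_template(text, start):
--     depth = 0
--     idx = start
--     while idx < len(text):
--         if text.startswith("{{", idx):
--             depth += 1
--             idx += 2
--             continue
--         if text.startswith("}}", idx) and depth:
--             depth -= 1
--             idx += 2
--             if depth == 0:
--                 return idx, text[start + 2 : idx - 2]
--             continue
--         idx += 1
--     return None, None
-- ===== SOURCE B (Python) =====
-- def _extract_template(text, start):
--     o = text.find("{{", start)
--     if o == -1:
--         return None, None
--     end = _match_close(text, o + 2)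
--     if end is None:
--         return None, None
--     return end, text[start + 2 : end - 2]
--
-- def _match_close(text, i):
--     # index just past the "}}" that matches the "{{" opened right before i,
--     # recursing into nested templates; None if unclosed
--     while True:
--         c = text.find("}}", i)
--         if c == -1:
--             return None
--         o = text.find("{{", i)
--         if o != -1 and o < c:
--             j = _match_close(text, o + 2)
--             if j is None:
--                 return None
--             i = j
--         else:
--             return c + 2
-- ===== Notes on version B (the rewrite author's own statement) =====
-- stated objective: faster
-- what changed: A scans character by character with an explicit depth counter; B has no depth variable at all: it finds the first '{{' with str.find and then matches its closing '}}' by recursive descent on the nesting structure (each nested '{{' handled by a recursive call), hopping between delimiters with str.find. Pre_ excludes negative start, where A's negative running index is clamped by startswith/slicing so A rescans the front of the string and reports offsets relative to the wrong origin; B searches from the clamped position len+start.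
-- outside the precondition, e.g. on _extract_template('{{}}', -4): A returns (0, ''), B returns (4, ''); on _extract_template('{{}}', -1): A returns (4, '{'), B returns (None, None)
import Mathlib
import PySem

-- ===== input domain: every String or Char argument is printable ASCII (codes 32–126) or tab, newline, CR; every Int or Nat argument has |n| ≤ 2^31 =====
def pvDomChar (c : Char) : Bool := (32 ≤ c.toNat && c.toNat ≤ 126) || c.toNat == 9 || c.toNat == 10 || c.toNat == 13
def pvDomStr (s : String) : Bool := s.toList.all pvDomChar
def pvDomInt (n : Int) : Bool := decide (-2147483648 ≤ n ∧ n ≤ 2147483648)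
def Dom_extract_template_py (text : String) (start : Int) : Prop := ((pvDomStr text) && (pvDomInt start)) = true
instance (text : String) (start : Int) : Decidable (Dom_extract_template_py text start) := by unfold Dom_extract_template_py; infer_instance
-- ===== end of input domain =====

-- B replaces A's character-by-character depth-counter scan by recursive descent on the nesting
-- structure, hopping between delimiters with str.find (objective: faster by a constant factor).

-- ===== PORT A =====
-- Python's text.startswith(p, i) tests p against text[i:] with slice clamping of i; the port
-- writes it as Chars.startswith of PySem.List.slice (exact, including negative-start clamping).
-- fuel is a totality guard only: the while loop advances idx every iteration, so
-- (len(text) - idx) + 1 iterations always suffice.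
def aLoop (cs : List Char) (start : Int) : Nat → Int → Int → Option Int × Option String
  | 0, _, _ => (none, none)
  | fuel + 1, depth, idx =>
    if idx < (cs.length : Int) then
      if PySem.Chars.startswith (PySem.List.slice cs (some idx) none) ['{', '{'] then
        aLoop cs start fuel (depth + 1) (idx + 2)
      else if PySem.Chars.startswith (PySem.List.slice cs (some idx) none) ['}', '}'] &&
          !(depth == 0) then
        let depth1 := depth - 1
        let idx1 := idx + 2
        if depth1 == 0 then
          (some idx1,
            some (String.ofList (PySem.List.slice cs (some (start + 2)) (some (idx1 - 2)))))
        else aLoop cs start fuel depth1 idx1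
      else aLoop cs start fuel depth (idx + 1)
    else (none, none)

def extract_template_py (text : String) (start : Int) : Option Int × Option String :=
  aLoop text.toList start (((text.toList.length : Int) - start).toNat + 1) 0 start

-- ===== PORT B =====
-- Source B's _match_close: returns the index just past the "}}" matching the "{{" opened right
-- before i, recursing into nested templates; str.find is PySem.Chars.findFrom (exact, including
-- negative-start clamping). fuel is a totality guard only: i strictly increases across the loop
-- and the recursive calls, so (len(text) + 2 - i) + 1 steps always suffice.
def mClose (cs : List Char) : Nat → Int → Option Int
  | 0, _ => none
  | fuel + 1, i =>
    let c := PySem.Chars.findFrom cs ['}', '}'] i none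
    if c == -1 then none
    else
      let o := PySem.Chars.findFrom cs ['{', '{'] i none
      if !(o == -1) && decide (o < c) then
        match mClose cs fuel (o + 2) with
        | none => none
        | some j => mClose cs fuel j
      else some (c + 2)

def extract_template_py_alt (text : String) (start : Int) : Option Int × Option String :=
  let cs := text.toList
  let o := PySem.Chars.findFrom cs ['{', '{'] start none
  if o == -1 then (none, none)
  else
    match mClose cs (((cs.length : Int) + 2 - start).toNat + 1) (o + 2) with
    | none => (none, none)
    | some e =>
      (some e, some (String.ofList (PySem.List.slice cs (some (start + 2)) (some (e - 2)))))

-- ===== PRECONDITION & SPEC =====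
-- Pre_ excludes negative start, on which A still returns but its value is an artefact of
-- Python's negative-offset clamping: A keeps its running index negative, startswith/slicing
-- clamp it, so A can rescan the front of the string and report an index relative to the wrong
-- origin (e.g. (0, '') on ('{{}}', -4), where the template ends at 4); B searches from the
-- clamped position len+start onward. A negative start is outside the function's natural domain
-- (start is meant to be the index of a '{{').
def Pre_extract_template_py (_text : String) (start : Int) : Prop := 0 ≤ start
instance (text : String) (start : Int) : Decidable (Pre_extract_template_py text start) := by
  unfold Pre_extract_template_py; infer_instance

def pvWitness_extract_template_py : String × Int := ("a {{b}} c", 0)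

def Spec_extract_template_py (text : String) (start : Int) (out : Option Int × Option String) :
    Prop := out = extract_template_py_alt text start
instance (text : String) (start : Int) (out : Option Int × Option String) :
    Decidable (Spec_extract_template_py text start out) := by
  unfold Spec_extract_template_py; infer_instance

-- ===== CLAIM (what is proved, stated in full; the proofs are below) =====
def Claim_equal_extract_template_py : Prop := ∀ (text : String) (start : Int), Dom_extract_template_py text start → Pre_extract_template_py text start → Spec_extract_template_py text start (extract_template_py text start)

-- ===== LEMMAS AND PROOFS =====
-- aRef is a well-founded (fuel-free) image of A's loop; aLoop_eq_ref shows the port carries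
-- enough fuel to coincide with it, pv_walk0/pv_walkAny move aRef across delimiter-free
-- stretches, and mlem relates aRef at depth d to B's recursive matcher mClose.

def stClamp (i : Int) (n : Nat) : Int := if i < 0 then (if i + n < 0 then 0 else i + n) else i

lemma stClamp_nonneg (i : Int) (n : Nat) (h : 0 ≤ i) : stClamp i n = i := by
  simp [stClamp, not_lt.2 h]

lemma pv_ff_eq (s sub : List Char) (i : Int) :
    PySem.Chars.findFrom s sub i none =
      if (s.length : Int) < stClamp i s.length then -1
      else if PySem.Chars.find (s.drop (stClamp i s.length).toNat) sub = -1 then -1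
      else stClamp i s.length + PySem.Chars.find (s.drop (stClamp i s.length).toNat) sub := by
  simp only [PySem.Chars.findFrom, stClamp, Int.toNat_natCast, List.take_length]

lemma pv_ff_bounds (s sub : List Char) (i : Int)
    (h : ¬ PySem.Chars.findFrom s sub i none = -1) :
    0 ≤ PySem.Chars.findFrom s sub i none ∧
    PySem.Chars.findFrom s sub i none + sub.length ≤ s.length ∧
    (0 ≤ i → i ≤ PySem.Chars.findFrom s sub i none) ∧
    sub <+: s.drop (PySem.Chars.findFrom s sub i none).toNat := by
  rw [pv_ff_eq] at h ⊢
  split_ifs at h ⊢ with h1 h2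
  · exact absurd rfl h
  · exact absurd rfl h
  · obtain ⟨st, hstdef⟩ : ∃ st, stClamp i s.length = st := ⟨_, rfl⟩
    rw [hstdef] at h1 h2 ⊢
    obtain ⟨f, hfdef⟩ : ∃ f, PySem.Chars.find (s.drop st.toNat) sub = f := ⟨_, rfl⟩
    rw [hfdef] at h2 ⊢
    have hst : 0 ≤ st := by rw [stClamp] at hstdef; split_ifs at hstdef <;> omega
    have hf0 : 0 ≤ f := by
      have := PySem.Chars.neg_one_le_find (s.drop st.toNat) sub; omega
    have hpre := (PySem.Chars.find_spec (hfdef ▸ hf0)).1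
    rw [hfdef] at hpre
    have hlen : sub.length ≤ ((s.drop st.toNat).drop f.toNat).length := hpre.length_le
    rw [List.length_drop, List.length_drop] at hlen
    have hstle : st ≤ (s.length : Int) := by omega
    have hfle := PySem.Chars.find_le_length (s.drop st.toNat) sub
    rw [hfdef, List.length_drop] at hfle
    have h5 : st.toNat + f.toNat + sub.length ≤ s.length := by omega
    refine ⟨by omega, by omega, fun hi => by rw [stClamp_nonneg i s.length hi] at hstdef; omega, ?_⟩
    rw [List.drop_drop] at hpre
    have : (st + f).toNat = st.toNat + f.toNat := by omega
    rw [this]; exact hpre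

def aRef (cs : List Char) (start : Int) (depth : Int) (idx : Int) :
    Option Int × Option String :=
  if h : idx < (cs.length : Int) then
    if PySem.Chars.startswith (PySem.List.slice cs (some idx) none) ['{', '{'] then
      aRef cs start (depth + 1) (idx + 2)
    else if PySem.Chars.startswith (PySem.List.slice cs (some idx) none) ['}', '}'] &&
        !(depth == 0) then
      let depth1 := depth - 1
      let idx1 := idx + 2
      if depth1 == 0 then
        (some idx1, some (String.ofList (PySem.List.slice cs (some (start + 2)) (some (idx1 - 2)))))
      else aRef cs start depth1 idx1
    else aRef cs start depth (idx + 1)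
  else (none, none)
termination_by ((cs.length : Int) - idx).toNat
decreasing_by all_goals omega

lemma aLoop_eq_ref (cs : List Char) (start : Int) :
    ∀ (f : Nat) (depth idx : Int), ((cs.length : Int) - idx).toNat < f →
      aLoop cs start f depth idx = aRef cs start depth idx := by
  intro f
  induction f with
  | zero => intro depth idx h; omega
  | succ f ih =>
    intro depth idx h
    rw [aRef]
    simp only [aLoop]
    by_cases hl : idx < (cs.length : Int)
    · rw [dif_pos hl, if_pos hl]
      by_cases h1 : PySem.Chars.startswith (PySem.List.slice cs (some idx) none) ['{', '{'] = true
      · rw [if_pos h1, if_pos h1]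
        exact ih (depth + 1) (idx + 2) (by omega)
      · rw [if_neg h1, if_neg h1]
        by_cases h2 : (PySem.Chars.startswith (PySem.List.slice cs (some idx) none) ['}', '}'] &&
            !(depth == 0)) = true
        · rw [if_pos h2, if_pos h2]
          by_cases h3 : (depth - 1 == 0) = true
          · rw [if_pos h3, if_pos h3]
          · rw [if_neg h3, if_neg h3]
            exact ih (depth - 1) (idx + 2) (by omega)
        · rw [if_neg h2, if_neg h2]
          exact ih depth (idx + 1) (by omega)
    · rw [dif_neg hl, if_neg hl]

lemma pv_ff_min (s sub : List Char) (i : Int) (hi : 0 ≤ i)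
    (h : ¬ PySem.Chars.findFrom s sub i none = -1) (j : Nat) (hj1 : i ≤ (j : Int))
    (hj2 : (j : Int) < PySem.Chars.findFrom s sub i none) : ¬ sub <+: s.drop j := by
  rw [pv_ff_eq] at h hj2
  rw [stClamp_nonneg i s.length hi] at h hj2
  split_ifs at h hj2 with h1 h2
  · exact absurd rfl h
  · exact absurd rfl h
  · have hf0 : 0 ≤ PySem.Chars.find (s.drop i.toNat) sub := by
      have := PySem.Chars.neg_one_le_find (s.drop i.toNat) sub; omega
    have hmin := (PySem.Chars.find_spec hf0).2
    intro hp
    have hji : i.toNat ≤ j := by omega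
    have : sub <+: (s.drop i.toNat).drop (j - i.toNat) := by
      rw [List.drop_drop]; rwa [Nat.add_sub_cancel' hji]
    exact hmin (j - i.toNat) (by omega) this

lemma pv_ff_none_ge (s sub : List Char) (i : Int) (hi : 0 ≤ i) (hsub : sub ≠ [])
    (h : PySem.Chars.findFrom s sub i none = -1) (j : Nat) (hj : i ≤ (j : Int)) :
    ¬ sub <+: s.drop j := by
  rw [pv_ff_eq, stClamp_nonneg i s.length hi] at h
  split_ifs at h with h1 h2
  · intro hp
    have : s.length ≤ j := by omega
    rw [List.drop_eq_nil_of_le this] at hp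
    exact hsub (List.prefix_nil.mp hp)
  · have hni := (PySem.Chars.find_eq_neg_one_iff (s.drop i.toNat) sub).mp h2
    intro hp
    apply hni
    have : sub <+: (s.drop i.toNat).drop (j - i.toNat) := by
      rw [List.drop_drop]; rwa [Nat.add_sub_cancel' (by omega : i.toNat ≤ j)]
    exact this.isInfix.trans (List.drop_suffix _ _).isInfix
  · have := PySem.Chars.neg_one_le_find (s.drop i.toNat) sub; omega

lemma pv_not_open_close (l : List Char) (h1 : ['{', '{'] <+: l) (h2 : ['}', '}'] <+: l) :
    False := by
  rcases h1 with ⟨t1, e1⟩; rcases h2 with ⟨t2, e2⟩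
  rw [← e1] at e2; simp at e2

lemma aRef_step (cs : List Char) (start depth idx : Int) (h0 : 0 ≤ idx) :
    aRef cs start depth idx =
      if idx < (cs.length : Int) then
        if ['{', '{'] <+: cs.drop idx.toNat then aRef cs start (depth + 1) (idx + 2)
        else if ['}', '}'] <+: cs.drop idx.toNat ∧ depth ≠ 0 then
          (if depth - 1 = 0 then
            (some (idx + 2),
              some (String.ofList (PySem.List.slice cs (some (start + 2)) (some (idx + 2 - 2)))))
          else aRef cs start (depth - 1) (idx + 2))
        else aRef cs start depth (idx + 1)
      else (none, none) := by
  rw [aRef]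
  simp only [PySem.List.slice_from cs h0, PySem.Chars.startswith_iff, Bool.and_eq_true,
    Bool.not_eq_true', beq_eq_false_iff_ne, beq_iff_eq, dite_eq_ite]

lemma aRef_end (cs : List Char) (start depth idx : Int) (h : ¬ idx < (cs.length : Int)) :
    aRef cs start depth idx = (none, none) := by
  rw [aRef]; simp [h]

lemma pv_walk0 (cs : List Char) (start : Int) (n : Nat) :
    ∀ i m : Int, 0 ≤ i → i ≤ m → (m - i).toNat ≤ n →
      (∀ j : Nat, i ≤ (j : Int) → (j : Int) < m → ¬ ['{', '{'] <+: cs.drop j) →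
      aRef cs start 0 i = aRef cs start 0 m := by
  induction n with
  | zero =>
    intro i m h0 him hn _
    have : i = m := by omega
    rw [this]
  | succ n ih =>
    intro i m h0 him hn hno
    rcases eq_or_lt_of_le him with he | hlt
    · rw [he]
    by_cases hl : i < (cs.length : Int)
    · rw [aRef_step cs start 0 i h0]
      rw [if_pos hl]
      rw [if_neg (hno i.toNat (by omega) (by omega))]
      rw [if_neg (by simp)]
      exact ih (i + 1) m (by omega) (by omega) (by omega)
        (fun j hj1 hj2 => hno j (by omega) hj2)
    · rw [aRef_end cs start 0 i hl, aRef_end cs start 0 m (by omega)]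

lemma pv_walkAny (cs : List Char) (start : Int) (n : Nat) :
    ∀ (depth : Int) (i m : Int), 0 ≤ i → i ≤ m → (m - i).toNat ≤ n →
      (∀ j : Nat, i ≤ (j : Int) → (j : Int) < m →
        ¬ ['{', '{'] <+: cs.drop j ∧ ¬ ['}', '}'] <+: cs.drop j) →
      aRef cs start depth i = aRef cs start depth m := by
  induction n with
  | zero =>
    intro depth i m h0 him hn _
    have : i = m := by omega
    rw [this]
  | succ n ih =>
    intro depth i m h0 him hn hno
    rcases eq_or_lt_of_le him with he | hlt
    · rw [he]
    by_cases hl : i < (cs.length : Int)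
    · rw [aRef_step cs start depth i h0]
      rw [if_pos hl]
      rw [if_neg (hno i.toNat (by omega) (by omega)).1]
      rw [if_neg (by
        intro hcl
        exact (hno i.toNat (by omega) (by omega)).2 hcl.1)]
      exact ih depth (i + 1) m (by omega) (by omega) (by omega)
        (fun j hj1 hj2 => hno j (by omega) hj2)
    · rw [aRef_end cs start depth i hl, aRef_end cs start depth m (by omega)]

-- A's loop with no "}}" anywhere at or after idx ends with (None, None), whatever the depth.
lemma aNoClose (cs : List Char) (start : Int) (n : Nat) :
    ∀ (depth i : Int), 0 ≤ i → ((cs.length : Int) - i).toNat ≤ n →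
      (∀ j : Nat, i ≤ (j : Int) → ¬ ['}', '}'] <+: cs.drop j) →
      aRef cs start depth i = (none, none) := by
  induction n with
  | zero =>
    intro depth i h0 hn hno
    exact aRef_end cs start depth i (by omega)
  | succ n ih =>
    intro depth i h0 hn hno
    by_cases hl : i < (cs.length : Int)
    · rw [aRef_step cs start depth i h0, if_pos hl]
      by_cases hop : ['{', '{'] <+: cs.drop i.toNat
      · rw [if_pos hop]
        exact ih (depth + 1) (i + 2) (by omega) (by omega) (fun j hj => hno j (by omega))
      · rw [if_neg hop]
        rw [if_neg (fun hcl => hno i.toNat (by omega) hcl.1)]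
        exact ih depth (i + 1) (by omega) (by omega) (fun j hj => hno j (by omega))
    · exact aRef_end cs start depth i hl

-- The heart: B's recursive matcher mClose computes exactly where A's scan at depth d ≥ 1 is
-- heading, together with bounds on its result (strong induction on len + 2 - i).
lemma mlem (cs : List Char) (start : Int) :
    ∀ (k : Nat), ∀ (i : Int), 0 ≤ i → ((cs.length : Int) + 2 - i).toNat ≤ k →
      ∀ (f : Nat), k < f →
      (∀ j, mClose cs f i = some j → i + 2 ≤ j ∧ j ≤ (cs.length : Int)) ∧
      (∀ d : Int, 1 ≤ d →
        aRef cs start d i =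
          match mClose cs f i with
          | none => (none, none)
          | some j =>
            if d - 1 = 0 then
              (some j,
                some (String.ofList (PySem.List.slice cs (some (start + 2)) (some (j - 2)))))
            else aRef cs start (d - 1) j) := by
  intro k
  induction k using Nat.strong_induction_on with
  | _ k ih =>
    intro i h0 hk f hf
    obtain ⟨f0, rfl⟩ : ∃ f0, f = f0 + 1 := ⟨f - 1, by omega⟩
    simp only [mClose]
    by_cases hc : PySem.Chars.findFrom cs ['}', '}'] i none = -1
    · -- no close at all: both sides fail
      rw [if_pos (by simpa using hc)]
      refine ⟨fun j hj => by simp at hj, fun d hd => ?_⟩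
      exact aNoClose cs start ((cs.length : Int) - i).toNat d i h0 le_rfl
        (pv_ff_none_ge cs ['}', '}'] i h0 (by simp) hc)
    · rw [if_neg (by simpa using hc)]
      obtain ⟨hc1, hc2, hc3, hc4⟩ := pv_ff_bounds cs ['}', '}'] i hc
      simp only [List.length_cons, List.length_nil] at hc2
      have hcle : i ≤ PySem.Chars.findFrom cs ['}', '}'] i none := hc3 h0
      by_cases hop : ¬ PySem.Chars.findFrom cs ['{', '{'] i none = -1 ∧
          PySem.Chars.findFrom cs ['{', '{'] i none <
            PySem.Chars.findFrom cs ['}', '}'] i none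
      · -- a nested open comes first: recurse
        rw [if_pos (by simp only [Bool.and_eq_true, Bool.not_eq_true', beq_eq_false_iff_ne,
            ne_eq, decide_eq_true_eq]; exact hop)]
        obtain ⟨hb1, hb2, hb3, hb4⟩ := pv_ff_bounds cs ['{', '{'] i hop.1
        simp only [List.length_cons, List.length_nil] at hb2
        have hble : i ≤ PySem.Chars.findFrom cs ['{', '{'] i none := hb3 h0
        obtain ⟨o, hodef⟩ : ∃ o, PySem.Chars.findFrom cs ['{', '{'] i none = o := ⟨_, rfl⟩
        rw [hodef] at hop hb1 hb2 hb4 hble ⊢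
        -- A walks from i to o over a delimiter-free stretch
        have hwalk : ∀ d : Int, aRef cs start d i = aRef cs start d o := by
          intro d
          refine pv_walkAny cs start (o - i).toNat d i o h0 hble le_rfl ?_
          intro j hj1 hj2
          refine ⟨pv_ff_min cs ['{', '{'] i h0 (by rw [hodef]; exact hop.1) j hj1
            (by rw [hodef]; omega), ?_⟩
          exact pv_ff_min cs ['}', '}'] i h0 hc j hj1 (by omega)
        have hstep : ∀ d : Int, aRef cs start d o = aRef cs start (d + 1) (o + 2) := by
          intro d
          rw [aRef_step cs start d o hb1, if_pos (by omega), if_pos hb4]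
        have ih1 := ih ((cs.length : Int) + 2 - (o + 2)).toNat (by omega) (o + 2) (by omega)
          le_rfl f0 (by omega)
        cases hm : mClose cs f0 (o + 2) with
        | none =>
          refine ⟨fun j hj => by exact absurd hj (by simp), fun d hd => ?_⟩
          rw [hwalk d, hstep d]
          have h1 := ih1.2 (d + 1) (by omega)
          rw [hm] at h1
          exact h1
        | some j =>
          obtain ⟨hj1, hj2⟩ := ih1.1 j hm
          have hj0 : 0 ≤ j := by omega
          have ih2 := ih ((cs.length : Int) + 2 - j).toNat (by omega) j hj0 le_rfl f0 (by omega)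
          refine ⟨fun j' hj' => ?_, fun d hd => ?_⟩
          · obtain ⟨hx1, hx2⟩ := ih2.1 j' hj'
            exact ⟨by omega, hx2⟩
          · rw [hwalk d, hstep d]
            have h1 := ih1.2 (d + 1) (by omega)
            simp only [hm] at h1
            rw [if_neg (by omega : ¬ d + 1 - 1 = 0), (by omega : d + 1 - 1 = d)] at h1
            rw [h1]
            exact ih2.2 d hd
      · -- the close comes first: it matches our open
        rw [if_neg (by
          simp only [Bool.and_eq_true, Bool.not_eq_true', beq_eq_false_iff_ne, ne_eq,
            decide_eq_true_eq]
          exact hop)]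
        obtain ⟨c, hcdef⟩ : ∃ c, PySem.Chars.findFrom cs ['}', '}'] i none = c := ⟨_, rfl⟩
        rw [hcdef] at hc1 hc2 hc4 hcle hop
        refine ⟨fun j hj => by
          simp only [Option.some.injEq] at hj
          omega, fun d hd => ?_⟩
        -- no "{{" strictly before c
        have hnoopen : ∀ j : Nat, i ≤ (j : Int) → (j : Int) < c →
            ¬ ['{', '{'] <+: cs.drop j := by
          intro j hj1 hj2
          by_cases ho : PySem.Chars.findFrom cs ['{', '{'] i none = -1
          · exact pv_ff_none_ge cs ['{', '{'] i h0 (by simp) ho j hj1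
          · have : ¬ PySem.Chars.findFrom cs ['{', '{'] i none < c := fun hlt => hop ⟨ho, hlt⟩
            exact pv_ff_min cs ['{', '{'] i h0 ho j hj1 (by omega)
        have hwalk : aRef cs start d i = aRef cs start d c := by
          refine pv_walkAny cs start (c - i).toNat d i c h0 hcle le_rfl ?_
          intro j hj1 hj2
          exact ⟨hnoopen j hj1 hj2, pv_ff_min cs ['}', '}'] i h0 hc j hj1 (by rw [hcdef]; omega)⟩
        rw [hwalk, aRef_step cs start d c hc1, if_pos (by omega)]
        rw [if_neg (fun hopc => pv_not_open_close _ hopc hc4)]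
        rw [if_pos ⟨hc4, by omega⟩]
        simp only [hcdef]

-- ===== VERDICT (by name: the statement is the Claim_ definition above) =====
theorem extract_template_py_spec : Claim_equal_extract_template_py := by
  intro text start hdom hpre
  unfold Spec_extract_template_py
  unfold extract_template_py extract_template_py_alt
  rw [aLoop_eq_ref text.toList start (((text.toList.length : Int) - start).toNat + 1) 0 start
      (by omega)]
  simp only []
  by_cases ho : PySem.Chars.findFrom text.toList ['{', '{'] start none = -1
  · rw [if_pos (by simpa using ho)]
    by_cases hl : start ≤ (text.toList.length : Int)
    · rw [pv_walk0 text.toList start ((text.toList.length : Int) - start).toNat start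
        (text.toList.length : Int) hpre hl le_rfl
        (fun j hj1 _ => pv_ff_none_ge text.toList ['{', '{'] start hpre (by simp) ho j hj1)]
      exact aRef_end text.toList start 0 (text.toList.length : Int) (by omega)
    · exact aRef_end text.toList start 0 start (by omega)
  · rw [if_neg (by simpa using ho)]
    obtain ⟨hb1, hb2, hb3, hb4⟩ := pv_ff_bounds text.toList ['{', '{'] start ho
    simp only [List.length_cons, List.length_nil] at hb2
    have hble : start ≤ PySem.Chars.findFrom text.toList ['{', '{'] start none := hb3 hpre
    obtain ⟨o, hodef⟩ : ∃ o, PySem.Chars.findFrom text.toList ['{', '{'] start none = o := ⟨_, rfl⟩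
    rw [hodef] at hb1 hb2 hb4 hble ⊢
    rw [pv_walk0 text.toList start (o - start).toNat start o hpre hble le_rfl
      (fun j hj1 hj2 => pv_ff_min text.toList ['{', '{'] start hpre ho j hj1 (by omega))]
    rw [aRef_step text.toList start 0 o hb1, if_pos (by omega), if_pos hb4]
    have hm := (mlem text.toList start ((text.toList.length : Int) + 2 - (o + 2)).toNat (o + 2)
      (by omega) le_rfl (((text.toList.length : Int) + 2 - start).toNat + 1) (by omega)).2
      (0 + 1) (by norm_num)
    rw [hm]
    cases mClose text.toList (((text.toList.length : Int) + 2 - start).toNat + 1) (o + 2) with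
    | none => rfl
    | some e => norm_num
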